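-- pv_equiv track=rewrite | github.com/inhyeokJeon/AALGGO | Python/baekjoon/21611_wizard_shark_blizard.py | delete_countinuous
-- ===== SOURCE A (Python) =====
-- from collections import deque
--
-- def delete_countinuous(extended: deque):
--     start = 0
--     end = 0
--     is_continuous = False
--
--     score = 0
--     while start <= end and end < len(extended) and extended[end] != 0:
--         if extended[start] == extended[end]:
--             end += 1
--             if end - start >= 4:
--                 is_continuous = True
--         else:
--             if is_continuous:
--                 score += ((end - start) * extended[start])
--                 for i in range(start, end):
--                     extended[i] = 0
--
--             start = end
--             end += 1
--             is_continuous = False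
--
--     if end - start >= 4:
--         score += ((end - start) * extended[start])
--         for i in range(start, end):
--             extended[i] = 0
--
--     return score
-- ===== SOURCE B (Python) =====
-- def delete_countinuous(extended):
--     # Staged per-element formulation: restrict to the prefix before the first
--     # zero, build a forward array f (run length ending at i) and a backward
--     # array b (run length starting at i); element i belongs to a maximal run of
--     # length f[i] + b[i] - 1, and contributes its own value iff that is >= 4.
--     # Scored elements are zeroed in place, as in the original.
--     n = 0
--     for v in extended:
--         if v == 0:
--             break
--         n += 1
--     prefix = list(extended)[:n]
--     f = [1] * n
--     for i in range(1, n):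
--         if prefix[i] == prefix[i - 1]:
--             f[i] = f[i - 1] + 1
--     b = [1] * n
--     for i in range(n - 2, -1, -1):
--         if prefix[i] == prefix[i + 1]:
--             b[i] = b[i + 1] + 1
--     score = 0
--     for i in range(n):
--         if f[i] + b[i] - 1 >= 4:
--             score += prefix[i]
--             extended[i] = 0
--     return score
-- ===== Notes on version B (the rewrite author's own statement) =====
-- stated objective: alternative
-- what changed: Replaced the two-pointer run scan with a staged per-element formulation: forward and backward run-length arrays over the prefix before the first zero, summing each element whose maximal run length f[i]+b[i]-1 is at least 4.
import Mathlib
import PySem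

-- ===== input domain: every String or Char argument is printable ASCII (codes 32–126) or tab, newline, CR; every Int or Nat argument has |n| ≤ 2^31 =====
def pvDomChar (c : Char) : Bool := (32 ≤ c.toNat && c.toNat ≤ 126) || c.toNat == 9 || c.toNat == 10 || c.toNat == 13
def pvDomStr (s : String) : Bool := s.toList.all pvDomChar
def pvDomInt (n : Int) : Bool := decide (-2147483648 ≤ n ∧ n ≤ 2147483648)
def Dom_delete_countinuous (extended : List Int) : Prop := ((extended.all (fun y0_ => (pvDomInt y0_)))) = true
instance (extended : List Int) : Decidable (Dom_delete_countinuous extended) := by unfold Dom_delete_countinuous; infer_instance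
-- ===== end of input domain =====

-- B replaces A's two-pointer run scan by a staged per-element formulation (forward/backward
-- run-length arrays over the prefix before the first zero); objective: alternative.
-- A mutates its argument in place (zeroes scored runs); B performs the same mutation in Python,
-- but the equivalence proved here is about the RETURN value only.

-- ===== PORT A =====
-- 'for i in range(start, end): extended[i] = 0' — rebuilds the list with indices in [s,e) zeroed
def pyZeroRange (l : List Int) (s e : Nat) : List Int :=
  l.mapIdx (fun i x => if s ≤ i ∧ i < e then 0 else x)

-- the while loop; every iteration increments `e`, so fuel = len+1 suffices; indices read
-- (`s`, `e`) are in range whenever read (guaranteed by the loop guard), so getD is exact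
def aLoop (ext : List Int) (s e : Nat) (cont : Bool) (score : Int) :
    Nat → List Int × Nat × Nat × Int
  | 0 => (ext, s, e, score)
  | fuel + 1 =>
    if s ≤ e ∧ e < ext.length ∧ ext.getD e 0 ≠ 0 then
      if ext.getD s 0 = ext.getD e 0 then
        aLoop ext s (e + 1) (if 4 ≤ e + 1 - s then true else cont) score fuel
      else
        if cont then
          aLoop (pyZeroRange ext s e) e (e + 1) false
            (score + ((e : Int) - (s : Int)) * ext.getD s 0) fuel
        else
          aLoop ext e (e + 1) false score fuel
    else (ext, s, e, score)

-- the trailing 'if end - start >= 4' block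
def aFin : List Int × Nat × Nat × Int → Int
  | (ext, s, e, score) =>
    if 4 ≤ (e : Int) - (s : Int) then score + ((e : Int) - (s : Int)) * ext.getD s 0 else score

def delete_countinuous (extended : List Int) : Int :=
  aFin (aLoop extended 0 0 false 0 (extended.length + 1))

-- ===== PORT B =====
-- 'for v in extended: if v == 0: break; n += 1' — length of the prefix before the first zero
def bPrefixLen : List Int → Nat
  | [] => 0
  | v :: rest => if v = 0 then 0 else 1 + bPrefixLen rest

-- the forward pass: f[i] = f[i-1]+1 if p[i]=p[i-1] else 1 (carrying prev value and prev f)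
def fFrom (prev : Int) (k : Nat) : List Int → List Nat
  | [] => []
  | x :: xs => let k' := if x = prev then k + 1 else 1
               k' :: fFrom x k' xs

def fRuns : List Int → List Nat
  | [] => []
  | x :: xs => 1 :: fFrom x 1 xs

-- the backward pass: b[i] = b[i+1]+1 if p[i]=p[i+1] else 1, built right to left
def bRuns : List Int → List Nat
  | [] => []
  | [_] => [1]
  | x :: y :: xs => (if x = y then (bRuns (y :: xs)).headD 0 + 1 else 1) :: bRuns (y :: xs)

-- the scoring loop: element i contributes p[i] iff f[i] + b[i] - 1 >= 4
def bScore : List Int → List Nat → List Nat → Int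
  | x :: ps, fk :: fs, bk :: bs =>
      (if 4 ≤ fk + bk - 1 then x else 0) + bScore ps fs bs
  | _, _, _ => 0

def delete_countinuous_alt (extended : List Int) : Int :=
  let p := extended.take (bPrefixLen extended)
  bScore p (fRuns p) (bRuns p)

-- ===== PRECONDITION & SPEC =====
def Spec_delete_countinuous (extended : List Int) (out : Int) : Prop := out = delete_countinuous_alt extended
instance (extended : List Int) (out : Int) : Decidable (Spec_delete_countinuous extended out) := by unfold Spec_delete_countinuous; infer_instance

-- ===== CLAIM (what is proved, stated in full; the proofs are below) =====
def Claim_equal_delete_countinuous : Prop := ∀ (extended : List Int), Dom_delete_countinuous extended → Spec_delete_countinuous extended (delete_countinuous extended)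

-- ===== LEMMAS AND PROOFS =====

-- common reference function: scanning the remaining list with a current run (value v, length k)
def gScore : List Int → Int → Nat → Int
  | [], v, k => if 4 ≤ k then (k : Int) * v else 0
  | x :: xs, v, k =>
    if x = 0 then (if 4 ≤ k then (k : Int) * v else 0)
    else if x = v then gScore xs v (k + 1)
    else (if 4 ≤ k then (k : Int) * v else 0) + gScore xs x 1

theorem length_pyZeroRange (l : List Int) (s e : Nat) :
    (pyZeroRange l s e).length = l.length := by
  simp [pyZeroRange]

theorem getElem?_pyZeroRange_ge (l : List Int) (s e i : Nat) (h : e ≤ i) :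
    (pyZeroRange l s e)[i]? = l[i]? := by
  simp only [pyZeroRange, List.getElem?_mapIdx]
  cases l[i]? with
  | none => rfl
  | some x => simp only [Option.map_some]; rw [if_neg (by omega)]

theorem getD_pyZeroRange_ge (l : List Int) (s e i : Nat) (h : e ≤ i) :
    (pyZeroRange l s e).getD i 0 = l.getD i 0 := by
  simp [List.getD_eq_getElem?_getD, getElem?_pyZeroRange_ge l s e i h]

theorem drop_pyZeroRange_ge (l : List Int) (s e j : Nat) (h : e ≤ j) :
    (pyZeroRange l s e).drop j = l.drop j := by
  apply List.ext_getElem?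
  intro i
  simp only [List.getElem?_drop]
  exact getElem?_pyZeroRange_ge l s e (j + i) (by omega)

theorem drop_eq_getD_cons (l : List Int) (e : Nat) (h : e < l.length) :
    l.drop e = l.getD e 0 :: l.drop (e + 1) := by
  rw [List.getD_eq_getElem l 0 h]
  exact List.drop_eq_getElem_cons h

-- main invariant for A's loop
theorem aLoop_eq_gScore (fuel : Nat) :
    ∀ (l : List Int) (s e : Nat) (score : Int),
      s ≤ e → e ≤ l.length → l.length - e < fuel →
      (∀ i, s ≤ i → i < e → l.getD i 0 = l.getD s 0) →
      (s < e → l.getD s 0 ≠ 0) →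
      aFin (aLoop l s e (decide (4 ≤ e - s)) score fuel)
        = score + gScore (l.drop e) (l.getD s 0) (e - s) := by
  induction fuel with
  | zero => intro l s e score _ _ hf; omega
  | succ f ih =>
    intro l s e score hse hel hf huni hnz
    by_cases hg : s ≤ e ∧ e < l.length ∧ l.getD e 0 ≠ 0
    · obtain ⟨-, hel', hez⟩ := hg
      rw [drop_eq_getD_cons l e hel']
      rw [aLoop, if_pos ⟨hse, hel', hez⟩]
      by_cases heq : l.getD s 0 = l.getD e 0
      · rw [if_pos heq]
        have hcont : (if 4 ≤ e + 1 - s then true else decide (4 ≤ e - s))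
            = decide (4 ≤ e + 1 - s) := by
          by_cases h4 : 4 ≤ e + 1 - s
          · simp [h4]
          · simp [h4]; omega
        rw [hcont]
        rw [ih l s (e + 1) score (by omega) (by omega) (by omega)
          (by intro i h1 h2; rcases Nat.lt_or_ge i e with h | h
              · exact huni i h1 h
              · have : i = e := by omega
                subst this; exact heq.symm)
          (by intro _; rw [heq]; exact hez)]
        rw [gScore, if_neg hez, if_pos heq.symm]
        have : e + 1 - s = e - s + 1 := by omega
        rw [this]
      · rw [if_neg heq]
        have hslt : s < e := by
          rcases Nat.lt_or_ge s e with h | h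
          · exact h
          · have hes : s = e := by omega
            exact absurd (by rw [hes]) heq
        have hv0 : l.getD s 0 ≠ 0 := hnz hslt
        have hxv : ¬ l.getD e 0 = l.getD s 0 := fun h => heq h.symm
        by_cases h4 : 4 ≤ e - s
        · rw [decide_eq_true h4, if_pos rfl]
          have hih := ih (pyZeroRange l s e) e (e + 1)
            (score + ((e : Int) - (s : Int)) * l.getD s 0)
            (by omega) (by rw [length_pyZeroRange]; omega)
            (by rw [length_pyZeroRange]; omega)
            (by intro i h1 h2; have hie : i = e := by omega
                exact congrArg (fun j => (pyZeroRange l s e).getD j 0) hie)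
            (by intro _; rw [getD_pyZeroRange_ge l s e e (le_refl e)]; exact hez)
          rw [decide_eq_false (by omega : ¬ (4 ≤ e + 1 - e)),
              show e + 1 - e = 1 from by omega] at hih
          rw [hih, drop_pyZeroRange_ge l s e (e + 1) (by omega),
              getD_pyZeroRange_ge l s e e (le_refl e)]
          rw [gScore, if_neg hez, if_neg hxv, if_pos h4]
          have hcast : ((e : Int) - (s : Int)) = ((e - s : Nat) : Int) := by omega
          rw [hcast]; ring
        · rw [decide_eq_false h4, if_neg (by simp)]
          have hih := ih l e (e + 1) score (by omega) (by omega) (by omega)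
            (by intro i h1 h2; have hie : i = e := by omega
                exact congrArg (fun j => l.getD j 0) hie)
            (by intro _; exact hez)
          rw [decide_eq_false (by omega : ¬ (4 ≤ e + 1 - e)),
              show e + 1 - e = 1 from by omega] at hih
          rw [hih, gScore, if_neg hez, if_neg hxv, if_neg h4]
          ring
    · rw [aLoop, if_neg hg]
      have he : e = l.length ∨ (e < l.length ∧ l.getD e 0 = 0) := by
        by_cases h1 : e < l.length
        · right
          exact ⟨h1, by by_contra h2; exact hg ⟨hse, h1, h2⟩⟩
        · left; omega
      by_cases h4 : 4 ≤ e - s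
      · have haf : aFin (l, s, e, score)
            = score + ((e : Int) - (s : Int)) * l.getD s 0 := by
          rw [aFin, if_pos (by omega)]
        rw [haf]
        have hg4 : (if 4 ≤ e - s then ((e - s : Nat) : Int) * l.getD s 0 else 0)
            = ((e - s : Nat) : Int) * l.getD s 0 := if_pos h4
        have hcast : ((e : Int) - (s : Int)) = ((e - s : Nat) : Int) := by omega
        rcases he with he | he
        · subst he; rw [List.drop_length, gScore, hg4, hcast]
        · obtain ⟨hel', he0⟩ := he
          rw [drop_eq_getD_cons l e hel', gScore, if_pos he0, hg4, hcast]
      · have haf : aFin (l, s, e, score) = score := by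
          rw [aFin, if_neg (by omega)]
        rw [haf]
        have hg4 : (if 4 ≤ e - s then ((e - s : Nat) : Int) * l.getD s 0 else 0) = 0 :=
          if_neg h4
        rcases he with he | he
        · subst he; rw [List.drop_length, gScore, hg4]; ring
        · obtain ⟨hel', he0⟩ := he
          rw [drop_eq_getD_cons l e hel', gScore, if_pos he0, hg4]; ring

theorem A_eq_gScore (l : List Int) :
    delete_countinuous l = gScore l (l.getD 0 0) 0 := by
  have := aLoop_eq_gScore (l.length + 1) l 0 0 0 (le_refl 0) (by omega) (by omega)
    (by intro i h1 h2; omega) (by intro h; omega)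
  simpa [delete_countinuous] using this

-- ===== B-side lemmas =====

-- run-decomposition reference: score of each maximal run, whole list assumed zero-free
def RS : List Int → Int
  | [] => 0
  | x :: xs =>
      (if 4 ≤ 1 + (xs.takeWhile (· == x)).length
        then ((1 + (xs.takeWhile (· == x)).length : Nat) : Int) * x else 0)
        + RS (xs.dropWhile (· == x))
termination_by l => l.length
decreasing_by exact Nat.lt_succ_of_le (List.length_dropWhile_le _ _)

-- f-values along one maximal run: k+1, k+2, …; b-values: n, n-1, …, 1
def ascFrom (k n : Nat) : List Nat := (List.range n).map (fun j => k + 1 + j)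
def descTo (n : Nat) : List Nat := (List.range n).map (fun j => n - j)

theorem ascFrom_succ (k n : Nat) : ascFrom k (n + 1) = (k + 1) :: ascFrom (k + 1) n := by
  simp [ascFrom, List.range_succ_eq_map, List.map_map, Function.comp]
  intro j _
  omega

theorem descTo_succ (n : Nat) : descTo (n + 1) = (n + 1) :: descTo n := by
  simp [descTo, List.range_succ_eq_map, List.map_map, Function.comp]

theorem length_ascFrom (k n : Nat) : (ascFrom k n).length = n := by simp [ascFrom]
theorem length_descTo (n : Nat) : (descTo n).length = n := by simp [descTo]

theorem mem_takeWhile_beq (x a : Int) (xs : List Int)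
    (h : a ∈ xs.takeWhile (· == x)) : a = x := by
  have h' := List.mem_takeWhile_imp h
  exact eq_of_beq h'

theorem fFrom_run : ∀ (r : List Int) (v : Int) (k : Nat) (ys : List Int),
    (∀ a ∈ r, a = v) → (∀ y, ys.head? = some y → y ≠ v) →
    fFrom v k (r ++ ys) = ascFrom k r.length ++ fRuns ys := by
  intro r
  induction r with
  | nil =>
    intro v k ys _ hy
    cases ys with
    | nil => simp [fFrom, fRuns, ascFrom]
    | cons y ys' =>
      have : y ≠ v := hy y rfl
      simp [fFrom, fRuns, ascFrom, this]
  | cons a r' ih =>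
    intro v k ys hr hy
    have ha : a = v := hr a List.mem_cons_self
    subst ha
    rw [List.cons_append]
    simp only [fFrom, if_true, List.length_cons]
    rw [ascFrom_succ, List.cons_append,
        ih a (k + 1) ys (fun b hb => hr b (List.mem_cons_of_mem _ hb)) hy]

theorem bRuns_run : ∀ (r : List Int) (v : Int) (ys : List Int),
    (∀ a ∈ r, a = v) → (∀ y, ys.head? = some y → y ≠ v) →
    bRuns (r ++ ys) = descTo r.length ++ bRuns ys := by
  intro r
  induction r with
  | nil => intro v ys _ _; simp [descTo]
  | cons a r' ih =>
    intro v ys hr hy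
    have ha : a = v := hr a List.mem_cons_self
    subst ha
    have hrest := ih a ys (fun b hb => hr b (List.mem_cons_of_mem _ hb)) hy
    cases r' with
    | nil =>
      cases ys with
      | nil => simp [bRuns, descTo]
      | cons y ys' =>
        have hyv : y ≠ a := hy y rfl
        simp only [List.singleton_append, List.length_cons, List.length_nil]
        rw [bRuns, if_neg (fun h => hyv h.symm)]
        simp [descTo]
    | cons c r'' =>
      have hc : c = a := hr c (by simp)
      subst hc
      rw [List.cons_append, List.cons_append, bRuns, ← List.cons_append, hrest,
          if_pos rfl]
      rw [show (c :: r'').length = r''.length + 1 from rfl, descTo_succ]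
      have hhead : ((r''.length + 1) :: descTo r''.length ++ bRuns ys).headD 0
          = r''.length + 1 := rfl
      rw [hhead, show (c :: c :: r'').length = r''.length + 1 + 1 from rfl, descTo_succ,
          List.cons_append, List.cons_append, descTo_succ, List.cons_append]

theorem bScore_append : ∀ (a : List Int) (fa ba : List Nat)
    (a' : List Int) (fa' ba' : List Nat),
    a.length = fa.length → a.length = ba.length →
    bScore (a ++ a') (fa ++ fa') (ba ++ ba') = bScore a fa ba + bScore a' fa' ba' := by
  intro a
  induction a with
  | nil =>
    intro fa ba a' fa' ba' h1 h2
    cases fa with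
    | cons _ _ => simp at h1
    | nil =>
      cases ba with
      | cons _ _ => simp at h2
      | nil => simp [bScore]
  | cons x xs ih =>
    intro fa ba a' fa' ba' h1 h2
    cases fa with
    | nil => simp at h1
    | cons fk fs =>
      cases ba with
      | nil => simp at h2
      | cons bk bs =>
        simp only [List.cons_append, bScore]
        rw [ih fs bs a' fa' ba' (by simpa using h1) (by simpa using h2)]
        ring

-- one maximal run of length n (inside a total run of length m) scores n·v iff 4 ≤ m
theorem bScore_run : ∀ (r : List Int) (v : Int) (m : Nat),
    (∀ a ∈ r, a = v) → r.length ≤ m →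
    bScore r (ascFrom (m - r.length) r.length) (descTo r.length)
      = if 4 ≤ m then (r.length : Int) * v else 0 := by
  intro r
  induction r with
  | nil => intro v m _ _; simp [bScore]
  | cons a r' ih
    =>
    intro v m hr hm
    have ha : a = v := hr a List.mem_cons_self
    have hlen : (a :: r').length = r'.length + 1 := rfl
    rw [hlen] at hm ⊢
    rw [ascFrom_succ, descTo_succ, bScore]
    have harith : m - (r'.length + 1) + 1 + (r'.length + 1) - 1 = m := by omega
    rw [harith]
    have hstep : m - (r'.length + 1) + 1 = m - r'.length := by omega
    rw [hstep, ih v m (fun b hb => hr b (List.mem_cons_of_mem _ hb)) (by omega)]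
    by_cases h4 : 4 ≤ m
    · rw [if_pos h4, if_pos h4, if_pos h4, ha]
      push_cast; ring
    · rw [if_neg h4, if_neg h4, if_neg h4]; ring

-- B's three staged arrays compute exactly the run-decomposition score
theorem bScore_eq_RS : ∀ (p : List Int), bScore p (fRuns p) (bRuns p) = RS p := by
  intro p
  induction p using RS.induct with
  | case1 => simp [bScore, RS]
  | case2 x xs ih =>
    have hdec : x :: xs = (x :: xs.takeWhile (· == x)) ++ xs.dropWhile (· == x) := by
      simp [List.takeWhile_append_dropWhile]
    have hrun : ∀ a ∈ x :: xs.takeWhile (· == x), a = x := by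
      intro a ha
      rcases List.mem_cons.mp ha with h | h
      · exact h
      · exact mem_takeWhile_beq x a _ h
    have hhead : ∀ y, (xs.dropWhile (· == x)).head? = some y → y ≠ x := by
      intro y hy hxy
      have := List.head?_dropWhile_not (· == x) xs
      rw [hy] at this
      simp [hxy] at this
    have hf : fRuns (x :: xs) = ascFrom 0 (x :: xs.takeWhile (· == x)).length
        ++ fRuns (xs.dropWhile (· == x)) := by
      rw [fRuns, show (x :: xs.takeWhile (· == x)).length
            = (xs.takeWhile (· == x)).length + 1 from rfl, ascFrom_succ]
      congr 1
      conv_lhs => rw [show xs = xs.takeWhile (· == x) ++ xs.dropWhile (· == x) from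
        (List.takeWhile_append_dropWhile).symm]
      exact fFrom_run (xs.takeWhile (· == x)) x 1 (xs.dropWhile (· == x))
        (fun a ha => mem_takeWhile_beq x a xs ha) hhead
    have hb : bRuns (x :: xs) = descTo (x :: xs.takeWhile (· == x)).length
        ++ bRuns (xs.dropWhile (· == x)) := by
      conv_lhs => rw [hdec]
      exact bRuns_run _ x _ hrun hhead
    conv_lhs => rw [hf, hb, hdec]
    rw [bScore_append _ _ _ _ _ _ (by rw [length_ascFrom]) (by rw [length_descTo])]
    have hm0 : (x :: xs.takeWhile (· == x)).length - (x :: xs.takeWhile (· == x)).length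
        = 0 := by omega
    have hsc := bScore_run (x :: xs.takeWhile (· == x)) x
      (x :: xs.takeWhile (· == x)).length hrun (le_refl _)
    rw [hm0] at hsc
    rw [hsc, ih, RS]
    rw [show (x :: xs.takeWhile (· == x)).length
          = 1 + (xs.takeWhile (· == x)).length from by simp; omega]

-- gScore with a live run (v,k) closes that run and continues as RS, on zero-free input
theorem gScore_eq_RS : ∀ (xs : List Int) (v : Int) (k : Nat),
    (∀ a ∈ xs, a ≠ 0) →
    gScore xs v k
      = (if 4 ≤ k + (xs.takeWhile (· == v)).length
          then ((k + (xs.takeWhile (· == v)).length : Nat) : Int) * v else 0)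
        + RS (xs.dropWhile (· == v)) := by
  intro xs
  induction xs with
  | nil => intro v k _; simp [gScore, RS]
  | cons x xs' ih =>
    intro v k hz
    have hx0 : x ≠ 0 := hz x List.mem_cons_self
    have hz' : ∀ a ∈ xs', a ≠ 0 := fun a ha => hz a (List.mem_cons_of_mem _ ha)
    by_cases hxv : x = v
    · subst hxv
      rw [gScore, if_neg hx0, if_pos rfl,
          List.takeWhile_cons_of_pos (by simp), List.dropWhile_cons_of_pos (by simp)]
      rw [ih x (k + 1) hz']
      rw [show (x :: xs'.takeWhile (· == x)).length
            = (xs'.takeWhile (· == x)).length + 1 from rfl]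
      rw [show k + 1 + (xs'.takeWhile (· == x)).length
            = k + ((xs'.takeWhile (· == x)).length + 1) from by omega]
    · rw [gScore, if_neg hx0, if_neg hxv,
          List.takeWhile_cons_of_neg (by simp [hxv]),
          List.dropWhile_cons_of_neg (by simp [hxv])]
      rw [ih x 1 hz']
      rw [RS]
      simp only [List.length_nil, Nat.add_zero]

-- gScore only reads the prefix before the first zero
theorem gScore_takeWhile : ∀ (xs : List Int) (v : Int) (k : Nat),
    gScore xs v k = gScore (xs.takeWhile (fun a => !(a == 0))) v k := by
  intro xs
  induction xs with
  | nil => intro v k; simp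
  | cons x xs' ih =>
    intro v k
    by_cases hx0 : x = 0
    · subst hx0
      rw [List.takeWhile_cons_of_neg (by simp)]
      simp [gScore]
    · rw [List.takeWhile_cons_of_pos (by simp [hx0])]
      rw [gScore, gScore]
      rw [ih v (k + 1), ih x 1]

-- B's prefix length is exactly the takeWhile prefix
theorem take_bPrefixLen (l : List Int) :
    l.take (bPrefixLen l) = l.takeWhile (fun a => !(a == 0)) := by
  induction l with
  | nil => rfl
  | cons x xs ih =>
    by_cases hx0 : x = 0
    · subst hx0
      rw [bPrefixLen, if_pos rfl, List.takeWhile_cons_of_neg (by simp)]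
      rfl
    · rw [bPrefixLen, if_neg hx0, List.takeWhile_cons_of_pos (by simp [hx0])]
      rw [show 1 + bPrefixLen xs = bPrefixLen xs + 1 from by omega, List.take_succ_cons, ih]

theorem B_eq_gScore (l : List Int) :
    delete_countinuous_alt l = gScore l (l.getD 0 0) 0 := by
  rw [delete_countinuous_alt]
  rw [take_bPrefixLen, bScore_eq_RS]
  cases l with
  | nil => simp [RS, gScore]
  | cons x xs =>
    by_cases hx0 : x = 0
    · subst hx0
      rw [List.takeWhile_cons_of_neg (by simp)]
      rw [show ((0 : Int) :: xs).getD 0 0 = 0 from rfl, gScore, if_pos rfl]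
      simp [RS]
    · rw [List.takeWhile_cons_of_pos (by simp [hx0])]
      rw [show (x :: xs).getD 0 0 = x from rfl, gScore, if_neg hx0, if_pos rfl]
      rw [gScore_takeWhile xs x 1]
      rw [gScore_eq_RS (xs.takeWhile (fun a => !(a == 0))) x 1
        (by intro a ha
            have h' := List.mem_takeWhile_imp ha
            simpa using h')]
      rw [RS]

-- ===== VERDICT (by name: the statement is the Claim_ definition above) =====
theorem delete_countinuous_spec : Claim_equal_delete_countinuous := by
  intro extended _
  unfold Spec_delete_countinuous
  rw [A_eq_gScore, B_eq_gScore]
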